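-- pv_equiv track=rewrite | github.com/anntzer/defopt | lib/_defopt_napoleon.py | _recombine_set_tokens
-- ===== SOURCE A (Python) =====
-- import collections
--
-- def _recombine_set_tokens(tokens):
--     token_queue = collections.deque(tokens)
--     keywords = ('optional', 'default')
--
--     def takewhile_set(tokens):
--         open_braces = 0
--         previous_token = None
--         while True:
--             try:
--                 token = tokens.popleft()
--             except IndexError:
--                 break
--             if token == ', ':
--                 previous_token = token
--                 continue
--             if not token.strip():
--                 continue
--             if token in keywords:
--                 tokens.appendleft(token)
--                 if previous_token is not None:
--                     tokens.appendleft(previous_token)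
--                 break
--             if previous_token is not None:
--                 yield previous_token
--                 previous_token = None
--             if token == '{':
--                 open_braces += 1
--             elif token == '}':
--                 open_braces -= 1
--             yield token
--             if open_braces == 0:
--                 break
--
--     def combine_set(tokens):
--         while True:
--             try:
--                 token = tokens.popleft()
--             except IndexError:
--                 break
--             if token == '{':
--                 tokens.appendleft('{')
--                 yield ''.join(takewhile_set(tokens))
--             else:
--                 yield token
--     return list(combine_set(token_queue))
-- ===== SOURCE B (Python) =====
-- def _recombine_set_tokens(tokens):
--     keywords = ('optional', 'default')
--     out = []
--     inside = False
--     depth = 0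
--     buf = []
--     pending = None
--     for token in tokens:
--         if not inside:
--             if token == '{':
--                 inside = True
--                 depth = 1
--                 buf = ['{']
--                 pending = None
--             else:
--                 out.append(token)
--         elif token == ', ':
--             pending = token
--         elif not token.strip():
--             pass
--         elif token in keywords:
--             out.append(''.join(buf))
--             if pending is not None:
--                 out.append(pending)
--             out.append(token)
--             inside = False
--             pending = None
--         else:
--             if pending is not None:
--                 buf.append(pending)
--                 pending = None
--             if token == '{':
--                 depth += 1
--             elif token == '}':
--                 depth -= 1
--             buf.append(token)
--             if depth == 0:
--                 out.append(''.join(buf))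
--                 inside = False
--     if inside:
--         out.append(''.join(buf))
--     return out
-- ===== Notes on version B (the rewrite author's own statement) =====
-- stated objective: simpler
-- what changed: Replaced the deque-with-pushback and two nested generators by a single forward pass: one explicit state machine (inside/depth/buffer/pending) over the token list, with no re-queuing of tokens.
import Mathlib
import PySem

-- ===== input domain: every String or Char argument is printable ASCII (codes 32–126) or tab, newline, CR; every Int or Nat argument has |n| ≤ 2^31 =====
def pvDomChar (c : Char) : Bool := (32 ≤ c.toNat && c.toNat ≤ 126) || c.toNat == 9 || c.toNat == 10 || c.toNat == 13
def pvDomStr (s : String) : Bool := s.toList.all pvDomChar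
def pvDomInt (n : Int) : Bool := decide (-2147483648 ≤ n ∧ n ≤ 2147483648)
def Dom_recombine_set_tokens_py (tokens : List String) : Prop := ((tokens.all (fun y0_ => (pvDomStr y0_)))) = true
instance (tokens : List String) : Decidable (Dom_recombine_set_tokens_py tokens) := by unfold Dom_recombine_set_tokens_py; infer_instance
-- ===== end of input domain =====

-- B replaces A's deque-with-pushback and nested generators by a single forward state-machine pass (simpler; return value only, A does not mutate its argument).

-- ===== PORT A =====
-- helper list for 'previous_token' pushback / pending emission
def pvPend : Option String → List String
  | none => []
  | some p => [p]

-- takewhile_set: consumes from the queue, returns (yielded tokens, remaining queue)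
def takewhileSet : List String → Int → Option String → (List String × List String)
  | [], _, _ => ([], [])
  | token :: rest, openBraces, prev =>
    if token == ", " then takewhileSet rest openBraces (some token)
    else if PySem.Str.strip token == "" then takewhileSet rest openBraces prev
    else if token == "optional" || token == "default" then
      ([], pvPend prev ++ token :: rest)
    else
      let ob := if token == "{" then openBraces + 1 else if token == "}" then openBraces - 1 else openBraces
      if ob == 0 then (pvPend prev ++ [token], rest)
      else
        let r := takewhileSet rest ob none
        (pvPend prev ++ token :: r.1, r.2)

-- the remaining queue never grows by more than the pushed-back previous_token
theorem takewhileSet_rem_le : ∀ (l : List String) (ob : Int) (prev : Option String),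
    (takewhileSet l ob prev).2.length ≤ l.length + (pvPend prev).length := by
  intro l
  induction l with
  | nil => intro ob prev; simp [takewhileSet]
  | cons token rest ih =>
    intro ob prev
    simp only [takewhileSet]
    split
    · exact le_trans (ih _ _) (by simp [pvPend])
    · split
      · exact le_trans (ih _ _) (by cases prev <;> simp [pvPend])
      · split
        · cases prev <;> simp [pvPend] <;> omega
        · cases prev <;> simp only [pvPend] <;> split_ifs <;>
            first
              | (simp; done)
              | (simp; omega)
              | (refine le_trans (ih _ _) ?_; simp [pvPend]; omega)
              | (refine le_trans (ih _ _) ?_; simp [pvPend])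

theorem takewhileSet_brace (rest : List String) :
    takewhileSet ("{" :: rest) 0 none
      = ("{" :: (takewhileSet rest 1 none).1, (takewhileSet rest 1 none).2) := by
  have h : (PySem.Str.strip "{" == "") = false := by decide
  simp [takewhileSet, pvPend, h]

-- combine_set: pops tokens; on '{' pushes it back and joins one takewhile_set run
def combineSet : List String → List String
  | [] => []
  | token :: rest =>
    if token = "{" then
      PySem.Str.join "" (takewhileSet (token :: rest) 0 none).1
        :: combineSet (takewhileSet (token :: rest) 0 none).2
    else token :: combineSet rest
  termination_by l => l.length
  decreasing_by
  · rename_i h; subst h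
    rw [takewhileSet_brace]
    have := takewhileSet_rem_le rest 1 none
    simp [pvPend] at this
    simpa using Nat.lt_succ_of_le this
  · simp

def recombine_set_tokens_py (tokens : List String) : List String := combineSet tokens

-- ===== PORT B =====
-- state machine: output so far, inside-set flag, brace depth, set buffer, pending ', '
structure BSt where
  out : List String
  inside : Bool
  depth : Int
  buf : List String
  pending : Option String
deriving Repr, DecidableEq

def bStep (s : BSt) (token : String) : BSt :=
  if !s.inside then
    if token == "{" then ⟨s.out, true, 1, ["{"], none⟩
    else { s with out := s.out ++ [token] }
  else if token == ", " then { s with pending := some token }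
  else if PySem.Str.strip token == "" then s
  else if token == "optional" || token == "default" then
    { s with out := s.out ++ [PySem.Str.join "" s.buf] ++ pvPend s.pending ++ [token],
             inside := false, pending := none }
  else
    let d := if token == "{" then s.depth + 1 else if token == "}" then s.depth - 1 else s.depth
    let buf' := s.buf ++ pvPend s.pending ++ [token]
    if d == 0 then { s with out := s.out ++ [PySem.Str.join "" buf'], inside := false, pending := none }
    else { s with depth := d, buf := buf', pending := none }

def bFinish (s : BSt) : List String :=
  if s.inside then s.out ++ [PySem.Str.join "" s.buf] else s.out

def recombine_set_tokens_py_alt (tokens : List String) : List String :=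
  bFinish (tokens.foldl bStep ⟨[], false, 0, [], none⟩)

-- ===== PRECONDITION & SPEC =====
def Spec_recombine_set_tokens_py (tokens : List String) (out : List String) : Prop := out = recombine_set_tokens_py_alt tokens
instance (tokens : List String) (out : List String) : Decidable (Spec_recombine_set_tokens_py tokens out) := by unfold Spec_recombine_set_tokens_py; infer_instance

-- ===== CLAIM (what is proved, stated in full; the proofs are below) =====
def Claim_equal_recombine_set_tokens_py : Prop := ∀ (tokens : List String), Dom_recombine_set_tokens_py tokens → Spec_recombine_set_tokens_py tokens (recombine_set_tokens_py tokens)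

-- ===== LEMMAS AND PROOFS =====

-- combineSet unfolding lemmas
theorem combineSet_nil : combineSet [] = [] := by rw [combineSet]

theorem combineSet_cons_ne (t : String) (rest : List String) (h : t ≠ "{") :
    combineSet (t :: rest) = t :: combineSet rest := by
  rw [combineSet]; simp [h]

theorem combineSet_brace (rest : List String) :
    combineSet ("{" :: rest)
      = PySem.Str.join "" ("{" :: (takewhileSet rest 1 none).1)
          :: combineSet (takewhileSet rest 1 none).2 := by
  rw [combineSet]; simp [takewhileSet_brace]

-- simultaneous invariant: the fold in outside state produces out ++ combineSet l;
-- in inside state it produces out, the joined buffer extended by takewhile_set's yields,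
-- then combineSet of takewhile_set's remaining queue.
theorem pvMain : ∀ (n : ℕ) (l : List String), l.length ≤ n →
    (∀ (out : List String) (depth : Int) (buf : List String) (pending : Option String),
        bFinish (l.foldl bStep ⟨out, false, depth, buf, pending⟩) = out ++ combineSet l) ∧
    (∀ (out buf : List String) (depth : Int) (pending : Option String),
        1 ≤ depth → (pending = none ∨ pending = some ", ") →
        bFinish (l.foldl bStep ⟨out, true, depth, buf, pending⟩)
          = out ++ [PySem.Str.join "" (buf ++ (takewhileSet l depth pending).1)]
              ++ combineSet (takewhileSet l depth pending).2) := by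
  intro n
  induction n with
  | zero =>
    intro l hl
    have hnil : l = [] := by cases l with
      | nil => rfl
      | cons a b => simp at hl
    subst hnil
    constructor
    · intro out depth buf pending; simp [bFinish, combineSet_nil]
    · intro out buf depth pending hd hp; simp [bFinish, takewhileSet, combineSet_nil]
  | succ n ih =>
    intro l hl
    cases l with
    | nil =>
      constructor
      · intro out depth buf pending; simp [bFinish, combineSet_nil]
      · intro out buf depth pending hd hp; simp [bFinish, takewhileSet, combineSet_nil]
    | cons token rest =>
      have hr : rest.length ≤ n := by simp at hl; omega
      constructor
      · -- outside state
        intro out depth buf pending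
        rw [List.foldl_cons]
        by_cases hb : token = "{"
        · subst hb
          have hstrip : (PySem.Str.strip "{" == "") = false := by decide
          have hstep : bStep ⟨out, false, depth, buf, pending⟩ "{" = ⟨out, true, 1, ["{"], none⟩ := by
            simp [bStep]
          rw [hstep, (ih rest hr).2 out ["{"] 1 none (by norm_num) (Or.inl rfl),
              combineSet_brace]
          rw [List.singleton_append, List.append_assoc, List.singleton_append]
        · have hstep : bStep ⟨out, false, depth, buf, pending⟩ token
              = ⟨out ++ [token], false, depth, buf, pending⟩ := by
            simp [bStep, hb]
          rw [hstep, (ih rest hr).1 (out ++ [token]) depth buf pending,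
              combineSet_cons_ne token rest hb]
          simp
      · -- inside state
        intro out buf depth pending hd hp
        rw [List.foldl_cons]
        by_cases hc : token = ", "
        · subst hc
          have hstep : bStep ⟨out, true, depth, buf, pending⟩ ", " = ⟨out, true, depth, buf, some ", "⟩ := by
            simp [bStep]
          have htw : takewhileSet (", " :: rest) depth pending = takewhileSet rest depth (some ", ") := by
            simp [takewhileSet]
          rw [hstep, (ih rest hr).2 out buf depth (some ", ") hd (Or.inr rfl), htw]
        by_cases hs : PySem.Str.strip token = ""
        · have hstep : bStep ⟨out, true, depth, buf, pending⟩ token = ⟨out, true, depth, buf, pending⟩ := by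
            simp [bStep, hc, hs]
          have htw : takewhileSet (token :: rest) depth pending = takewhileSet rest depth pending := by
            simp [takewhileSet, hc, hs]
          rw [hstep, (ih rest hr).2 out buf depth pending hd hp, htw]
        by_cases hk : token = "optional" ∨ token = "default"
        · -- keyword: close the set, re-emit pending and the keyword as plain tokens
          have hknot : token ≠ "{" := by rcases hk with h | h <;> subst h <;> decide
          have hkb : (token == "optional" || token == "default") = true := by
            rcases hk with h | h <;> simp [h]
          have hstep : bStep ⟨out, true, depth, buf, pending⟩ token
              = ⟨out ++ [PySem.Str.join "" buf] ++ pvPend pending ++ [token], false, depth, buf, none⟩ := by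
            simp [bStep, hc, hs, hkb]
          have htw : takewhileSet (token :: rest) depth pending = ([], pvPend pending ++ token :: rest) := by
            simp [takewhileSet, hc, hs, hkb]
          rw [hstep, (ih rest hr).1 _ depth buf none, htw]
          rcases hp with hp | hp <;> subst hp
          · simp only [pvPend, List.nil_append, combineSet_cons_ne token rest hknot]
            simp
          · simp only [pvPend, List.singleton_append,
                combineSet_cons_ne ", " (token :: rest) (by decide),
                combineSet_cons_ne token rest hknot]
            simp
        · -- ordinary token: extend the buffer, adjust the depth
          push_neg at hk
          obtain ⟨hk1, hk2⟩ := hk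
          have hkb : (token == "optional" || token == "default") = false := by simp [hk1, hk2]
          by_cases hob : token = "{"
          · subst hob
            have hdz : (depth + 1 == 0) = false := by simp; omega
            have hstep : bStep ⟨out, true, depth, buf, pending⟩ "{"
                = ⟨out, true, depth + 1, buf ++ pvPend pending ++ ["{"], none⟩ := by
              simp [bStep, hc, hs, hkb, hdz]
            have htw : takewhileSet ("{" :: rest) depth pending
                = (pvPend pending ++ "{" :: (takewhileSet rest (depth + 1) none).1,
                   (takewhileSet rest (depth + 1) none).2) := by
              simp [takewhileSet, hc, hs, hkb, hdz]
            rw [hstep, (ih rest hr).2 out _ (depth + 1) none (by omega) (Or.inl rfl), htw]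
            simp [List.append_assoc]
          by_cases hcb : token = "}"
          · subst hcb
            by_cases hz : depth - 1 = 0
            · have hdz : (depth - 1 == 0) = true := by simp [hz]
              have hstep : bStep ⟨out, true, depth, buf, pending⟩ "}"
                  = ⟨out ++ [PySem.Str.join "" (buf ++ pvPend pending ++ ["}"])], false, depth, buf, none⟩ := by
                simp [bStep, hc, hs, hkb, hob, hdz]
              have htw : takewhileSet ("}" :: rest) depth pending = (pvPend pending ++ ["}"], rest) := by
                simp [takewhileSet, hc, hs, hkb, hob, hdz]
              rw [hstep, (ih rest hr).1 _ depth buf none, htw]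
              simp [List.append_assoc]
            · have hdz : (depth - 1 == 0) = false := by simp [hz]
              have hstep : bStep ⟨out, true, depth, buf, pending⟩ "}"
                  = ⟨out, true, depth - 1, buf ++ pvPend pending ++ ["}"], none⟩ := by
                simp [bStep, hc, hs, hkb, hob, hdz]
              have htw : takewhileSet ("}" :: rest) depth pending
                  = (pvPend pending ++ "}" :: (takewhileSet rest (depth - 1) none).1,
                     (takewhileSet rest (depth - 1) none).2) := by
                simp [takewhileSet, hc, hs, hkb, hob, hdz]
              rw [hstep, (ih rest hr).2 out _ (depth - 1) none (by omega) (Or.inl rfl), htw]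
              simp [List.append_assoc]
          · have hdz : (depth == 0) = false := by simp; omega
            have hstep : bStep ⟨out, true, depth, buf, pending⟩ token
                = ⟨out, true, depth, buf ++ pvPend pending ++ [token], none⟩ := by
              simp [bStep, hc, hs, hkb, hob, hcb, hdz]
            have htw : takewhileSet (token :: rest) depth pending
                = (pvPend pending ++ token :: (takewhileSet rest depth none).1,
                   (takewhileSet rest depth none).2) := by
              simp [takewhileSet, hc, hs, hkb, hob, hcb, hdz]
            rw [hstep, (ih rest hr).2 out _ depth none hd (Or.inl rfl), htw]
            simp [List.append_assoc]

-- ===== VERDICT (by name: the statement is the Claim_ definition above) =====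
theorem recombine_set_tokens_py_spec : Claim_equal_recombine_set_tokens_py := by
  intro tokens _
  unfold Spec_recombine_set_tokens_py recombine_set_tokens_py recombine_set_tokens_py_alt
  exact ((pvMain tokens.length tokens le_rfl).1 [] 0 [] none).symm
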